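-- pv_equiv track=rewrite | github.com/andrasfe/specter | specter/test_synthesis.py | _trace_backward
-- ===== SOURCE A (Python) =====
-- def _trace_backward(
--     target_var: str,
--     branch_line: int,
--     assignments: list[tuple[int, str, str, list[str]]],
--     max_depth: int = 3,
-- ) -> list[tuple[str, str]]:
--     """Trace backward from a branch to find input dependencies.
--
--     Starting from a condition variable at a specific line, walks backward
--     through assignments to find the chain of computations.
--
--     Returns list of (variable, expression) pairs representing the
--     backward chain, from condition var to inputs.
--     """
--     chain: list[tuple[str, str]] = []
--     frontier = {target_var}
--     seen_vars: set[str] = set()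
--
--     for depth in range(max_depth):
--         if not frontier:
--             break
--         next_frontier: set[str] = set()
--         for var in frontier:
--             if var in seen_vars or var == "__STUB__":
--                 continue
--             seen_vars.add(var)
--
--             # Find the LAST assignment to this var BEFORE the branch line
--             last_assign = None
--             for line_idx, avar, expr, deps in assignments:
--                 if avar == var and line_idx < branch_line:
--                     last_assign = (avar, expr, deps)
--
--             if last_assign:
--                 avar, expr, deps = last_assign
--                 chain.append((avar, expr))
--                 for dep in deps:
--                     if dep not in seen_vars:
--                         next_frontier.add(dep)
--         frontier = next_frontier
--
--     return chain
-- ===== SOURCE B (Python) =====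
-- def _process_level(last, frontier, seen):
--     """Process one BFS level: collect (var, expr) pairs and the next frontier."""
--     pairs = []
--     nxt = []
--     for var in frontier:
--         if var in seen or var == "__STUB__":
--             continue
--         seen.add(var)
--         hit = last.get(var)
--         if hit is not None:
--             expr, deps = hit
--             pairs.append((var, expr))
--             for dep in deps:
--                 if dep not in seen and dep not in nxt:
--                     nxt.append(dep)
--     return pairs, nxt
--
--
-- def _trace_backward(
--     target_var: str,
--     branch_line: int,
--     assignments: list[tuple[int, str, str, list[str]]],
--     max_depth: int = 3,
-- ) -> list[tuple[str, str]]: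
--     """Trace backward from a branch to find input dependencies.
--
--     One pass indexes the assignments by variable (a later assignment before
--     the branch line overwrites an earlier one, so the dict holds the LAST
--     relevant assignment of each variable); the BFS then looks each frontier
--     variable up in the dict instead of rescanning the whole assignment list.
--     """
--     last = {var: (expr, deps) for line, var, expr, deps in assignments if line < branch_line}
--     chain: list[tuple[str, str]] = []
--     seen: set[str] = set()
--     frontier = [target_var]
--     depth = 0
--     while frontier and depth < max_depth:
--         pairs, frontier = _process_level(last, frontier, seen)
--         chain += pairs
--         depth += 1
--     return chain
-- ===== Notes on version B (the rewrite author's own statement) =====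
-- stated objective: alternative
-- what changed: B replaces A's per-visited-variable rescan of the whole assignment list by a dictionary of each variable's last assignment before the branch line, built once up front, and runs the BFS as a while loop with plain list frontiers and O(1) lookups.
import Mathlib
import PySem

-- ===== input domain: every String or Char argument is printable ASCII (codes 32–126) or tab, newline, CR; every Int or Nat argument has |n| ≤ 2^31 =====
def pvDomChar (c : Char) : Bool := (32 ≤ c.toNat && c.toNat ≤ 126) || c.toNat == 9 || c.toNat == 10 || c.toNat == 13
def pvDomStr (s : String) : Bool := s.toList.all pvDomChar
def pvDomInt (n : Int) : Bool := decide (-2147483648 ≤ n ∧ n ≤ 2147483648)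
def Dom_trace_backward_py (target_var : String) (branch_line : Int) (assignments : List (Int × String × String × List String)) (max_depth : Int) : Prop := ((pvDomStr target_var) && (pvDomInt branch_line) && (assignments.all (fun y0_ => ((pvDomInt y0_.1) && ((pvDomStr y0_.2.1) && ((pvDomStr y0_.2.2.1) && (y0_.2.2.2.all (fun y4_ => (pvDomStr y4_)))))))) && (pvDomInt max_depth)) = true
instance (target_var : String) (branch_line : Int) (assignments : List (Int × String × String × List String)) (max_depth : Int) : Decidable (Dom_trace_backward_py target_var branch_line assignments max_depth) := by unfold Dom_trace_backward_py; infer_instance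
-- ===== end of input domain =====

-- B precomputes a dict of each variable's last assignment before the branch line, then runs the BFS
-- with a dict lookup per frontier variable instead of A's rescan of the whole assignment list.
-- Python A iterates its frontier as a Python set; the within-level order of the returned chain follows
-- Python's set iteration order, which PySem does not model — both ports use insertion order, and the
-- harness compares the returned list as a set, where the two orders agree.

-- ===== PORT A =====
-- inner linear scan of A: the LAST assignment to `var` with line_idx < branch_line
def pyLastAssign (var : String) (branch_line : Int) (assignments : List (Int × String × String × List String)) : Option (String × String × List String) :=
  assignments.foldl
    (fun acc p => if p.2.1 == var && decide (p.1 < branch_line) then some (p.2.1, p.2.2.1, p.2.2.2) else acc)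
    none

def pyDepthLoopA (branch_line : Int) (assignments : List (Int × String × String × List String)) : Nat → (List (String × String) × PySem.Set String × PySem.Set String) → (List (String × String) × PySem.Set String × PySem.Set String)
  | 0, st => st
  | fuel + 1, st =>
    -- state: (chain, frontier : set, seen_vars : set); frontier iterated in insertion order (see header)
    let chain := st.1; let frontier := st.2.1; let seen := st.2.2
    if frontier = [] then st          -- 'if not frontier: break'
    else
      let inner := frontier.foldl
        (fun st2 var =>
          if PySem.Set.contains st2.2.1 var || var == "__STUB__" then st2
          else
            let seen2 := PySem.Set.add st2.2.1 var
            match pyLastAssign var branch_line assignments with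
            | none => (st2.1, seen2, st2.2.2)
            | some (avar, expr, deps) =>
              (st2.1 ++ [(avar, expr)], seen2,
               deps.foldl (fun nf dep => if PySem.Set.contains seen2 dep then nf else PySem.Set.add nf dep) st2.2.2))
        (chain, seen, (PySem.Set.empty : PySem.Set String))
      pyDepthLoopA branch_line assignments fuel (inner.1, inner.2.2, inner.2.1)

def trace_backward_py (target_var : String) (branch_line : Int) (assignments : List (Int × String × String × List String)) (max_depth : Int) : List (String × String) :=
  -- 'for depth in range(max_depth)' runs max_depth.toNat times (none for max_depth ≤ 0), stopped early by the break
  (pyDepthLoopA branch_line assignments max_depth.toNat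
    (([] : List (String × String)), (PySem.Set.ofList [target_var] : PySem.Set String), (PySem.Set.empty : PySem.Set String))).1

-- ===== PORT B =====
-- one BFS level: returns (pairs appended this level, seen after the level, next frontier)
def pyLevelB (last : PySem.Dict String (String × List String)) (vars : List String) (seen : PySem.Set String) (nxt : List String) : List (String × String) × PySem.Set String × List String :=
  match vars with
  | [] => ([], seen, nxt)
  | var :: rest =>
    if PySem.Set.contains seen var || var == "__STUB__" then pyLevelB last rest seen nxt
    else
      let seen' := PySem.Set.add seen var
      match PySem.Dict.get? last var with
      | none => pyLevelB last rest seen' nxt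
      | some (expr, deps) =>
        let nxt' := deps.foldl (fun acc dep => if !(PySem.Set.contains seen' dep) && !(acc.contains dep) then acc ++ [dep] else acc) nxt
        let r := pyLevelB last rest seen' nxt'
        ((var, expr) :: r.1, r.2.1, r.2.2)

-- the 'while frontier and depth < max_depth' loop; the iteration count max_depth - depth is the fuel
def pyLoopB (last : PySem.Dict String (String × List String)) : Nat → List String → List (String × String) → PySem.Set String → List (String × String)
  | 0, _, chain, _ => chain
  | _ + 1, [], chain, _ => chain
  | fuel + 1, frontier, chain, seen =>
    let r := pyLevelB last frontier seen []
    pyLoopB last fuel r.2.2 (chain ++ r.1) r.2.1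

def trace_backward_py_alt (target_var : String) (branch_line : Int) (assignments : List (Int × String × String × List String)) (max_depth : Int) : List (String × String) :=
  -- dict comprehension: later keys overwrite, first-insertion position kept
  let last : PySem.Dict String (String × List String) :=
    (assignments.filter (fun p => decide (p.1 < branch_line))).foldl
      (fun d p => d.insert p.2.1 (p.2.2.1, p.2.2.2)) PySem.Dict.empty
  pyLoopB last max_depth.toNat [target_var] [] PySem.Set.empty

-- ===== PRECONDITION & SPEC =====
def Spec_trace_backward_py (target_var : String) (branch_line : Int) (assignments : List (Int × String × String × List String)) (max_depth : Int) (out : List (String × String)) : Prop := out = trace_backward_py_alt target_var branch_line assignments max_depth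
instance (target_var : String) (branch_line : Int) (assignments : List (Int × String × String × List String)) (max_depth : Int) (out : List (String × String)) : Decidable (Spec_trace_backward_py target_var branch_line assignments max_depth out) := by unfold Spec_trace_backward_py; infer_instance

-- ===== CLAIM (what is proved, stated in full; the proofs are below) =====
def Claim_equal_trace_backward_py : Prop := ∀ (target_var : String) (branch_line : Int) (assignments : List (Int × String × String × List String)) (max_depth : Int), Dom_trace_backward_py target_var branch_line assignments max_depth → Spec_trace_backward_py target_var branch_line assignments max_depth (trace_backward_py target_var branch_line assignments max_depth)


-- ===== LEMMAS AND PROOFS =====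

-- named copies of port A's loop bodies (definitionally equal to the lambdas in `trace_backward_py`)
def pvInnerA (branch_line : Int) (assignments : List (Int × String × String × List String)) (st2 : List (String × String) × PySem.Set String × PySem.Set String) (var : String) : List (String × String) × PySem.Set String × PySem.Set String :=
  if PySem.Set.contains st2.2.1 var || var == "__STUB__" then st2
  else
    let seen2 := PySem.Set.add st2.2.1 var
    match pyLastAssign var branch_line assignments with
    | none => (st2.1, seen2, st2.2.2)
    | some (avar, expr, deps) =>
      (st2.1 ++ [(avar, expr)], seen2,
       deps.foldl (fun nf dep => if PySem.Set.contains seen2 dep then nf else PySem.Set.add nf dep) st2.2.2)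

-- B's dict, named
def pvDictB (branch_line : Int) (assignments : List (Int × String × String × List String)) : PySem.Dict String (String × List String) :=
  (assignments.filter (fun p => decide (p.1 < branch_line))).foldl
    (fun d p => d.insert p.2.1 (p.2.2.1, p.2.2.2)) PySem.Dict.empty

-- common characterisation of the per-variable lookup: the LAST assignment to v before branch_line
def pvCanon (v : String) (branch_line : Int) (l : List (Int × String × String × List String)) : Option (Int × String × String × List String) :=
  (l.filter (fun p => p.2.1 == v && decide (p.1 < branch_line))).getLast?

lemma pyLastAssign_eq (v : String) (bl : Int) (l : List (Int × String × String × List String)) :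
    pyLastAssign v bl l = (pvCanon v bl l).map (fun p => (p.2.1, p.2.2.1, p.2.2.2)) := by
  induction l using List.reverseRecOn with
  | nil => rfl
  | append_singleton l p ih =>
    unfold pyLastAssign pvCanon at *
    rw [List.foldl_append, List.filter_append]
    simp only [List.foldl_cons, List.foldl_nil]
    by_cases h : (p.2.1 == v && decide (p.1 < bl)) = true
    · simp only [h, if_true, List.filter_cons, List.filter_nil, List.getLast?_concat, Option.map_some]
    · rw [Bool.not_eq_true] at h
      simp only [h, Bool.false_eq_true, if_false, List.filter_cons, List.filter_nil, List.append_nil]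
      exact ih

lemma dictB_get? (v : String) (bl : Int) (l : List (Int × String × String × List String)) :
    (pvDictB bl l).get? v = (pvCanon v bl l).map (fun p => (p.2.2.1, p.2.2.2)) := by
  induction l using List.reverseRecOn with
  | nil => rfl
  | append_singleton l p ih =>
    unfold pvDictB pvCanon at *
    rw [List.filter_append, List.filter_append, List.foldl_append]
    by_cases hb : decide (p.1 < bl) = true
    · simp only [List.filter_cons, List.filter_nil, hb, if_true, List.foldl_cons, List.foldl_nil]
      rw [PySem.Dict.get?_insert]
      by_cases hv : v = p.2.1
      · simp [hv]
      · have hbeq : (p.2.1 == v) = false := by simp [Ne.symm hv]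
        simp [hv, hbeq, ih]
    · simp [hb, ih]

lemma canon_fst (v : String) (bl : Int) (l : List (Int × String × String × List String)) (p : Int × String × String × List String)
    (h : pvCanon v bl l = some p) : p.2.1 = v := by
  have hm := List.mem_of_getLast? h
  have := (List.mem_filter.mp hm).2
  simp only [Bool.and_eq_true, beq_iff_eq] at this
  exact this.1

lemma dict_eq_scan (v : String) (bl : Int) (l : List (Int × String × String × List String)) :
    (pvDictB bl l).get? v = (pyLastAssign v bl l).map (fun t => t.2) := by
  rw [dictB_get?, pyLastAssign_eq]
  cases pvCanon v bl l <;> rfl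

lemma scan_fst (v : String) (bl : Int) (l : List (Int × String × String × List String)) (t : String × String × List String)
    (h : pyLastAssign v bl l = some t) : t.1 = v := by
  rw [pyLastAssign_eq] at h
  cases hc : pvCanon v bl l with
  | none => rw [hc] at h; cases h
  | some p =>
    rw [hc] at h
    cases h
    exact canon_fst v bl l p hc

-- the two next-frontier accumulators are the same function
lemma depfold_fun_eq (seen2 : PySem.Set String) :
    (fun (nf : PySem.Set String) dep => if PySem.Set.contains seen2 dep then nf else PySem.Set.add nf dep)
      = (fun (acc : List String) dep => if !(PySem.Set.contains seen2 dep) && !(acc.contains dep) then acc ++ [dep] else acc) := by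
  funext nf dep
  by_cases h1 : dep ∈ (seen2 : List String)
  · simp [PySem.Set.contains, h1]
  · by_cases h2 : dep ∈ nf
    · simp [PySem.Set.add, PySem.Set.contains, h1, h2]
    · simp [PySem.Set.add, PySem.Set.contains, h1, h2]

-- one level of A's inner loop IS pyLevelB
lemma level_eq (bl : Int) (asg : List (Int × String × String × List String))
    (last : PySem.Dict String (String × List String))
    (hget : ∀ v, PySem.Dict.get? last v = (pyLastAssign v bl asg).map (fun t => t.2)) :
    ∀ (vars : List String) (chain : List (String × String)) (seen nxt : PySem.Set String),
      vars.foldl (pvInnerA bl asg) (chain, seen, nxt)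
        = (chain ++ (pyLevelB last vars seen nxt).1, (pyLevelB last vars seen nxt).2.1, (pyLevelB last vars seen nxt).2.2) := by
  intro vars
  induction vars with
  | nil => intro chain seen nxt; simp [pyLevelB]
  | cons var rest ih =>
    intro chain seen nxt
    rw [List.foldl_cons]
    by_cases h1 : var ∈ (seen : List String) ∨ var = "__STUB__"
    · have hcb : (PySem.Set.contains seen var || var == "__STUB__") = true := by
        simpa [PySem.Set.contains] using h1
      have hA : pvInnerA bl asg (chain, seen, nxt) var = (chain, seen, nxt) := by
        unfold pvInnerA; rw [hcb]; simp
      have hB : pyLevelB last (var :: rest) seen nxt = pyLevelB last rest seen nxt := by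
        rw [pyLevelB, hcb]; simp
      rw [hA, hB]
      exact ih chain seen nxt
    · rw [not_or] at h1
      obtain ⟨hm, hs⟩ := h1
      have hcb : (PySem.Set.contains seen var || var == "__STUB__") = false := by
        simp [PySem.Set.contains, hm, hs]
      cases hc : pyLastAssign var bl asg with
      | none =>
        have hg := hget var
        rw [hc] at hg; simp only [Option.map_none] at hg
        have hA : pvInnerA bl asg (chain, seen, nxt) var = (chain, PySem.Set.add seen var, nxt) := by
          unfold pvInnerA; rw [hcb]; simp [hc]
        have hB : pyLevelB last (var :: rest) seen nxt = pyLevelB last rest (PySem.Set.add seen var) nxt := by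
          rw [pyLevelB, hcb, hg]; simp
        rw [hA, hB]
        exact ih chain (PySem.Set.add seen var) nxt
      | some t =>
        obtain ⟨avar, expr, deps⟩ := t
        have hfst : avar = var := scan_fst var bl asg _ hc
        have hg := hget var
        rw [hc] at hg; simp only [Option.map_some] at hg
        have hA : pvInnerA bl asg (chain, seen, nxt) var
            = (chain ++ [(avar, expr)], PySem.Set.add seen var,
               deps.foldl (fun nf dep => if PySem.Set.contains (PySem.Set.add seen var) dep then nf else PySem.Set.add nf dep) nxt) := by
          unfold pvInnerA; rw [hcb]; simp [hc]
        set nxt' := deps.foldl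
            (fun acc dep => if !(PySem.Set.contains (PySem.Set.add seen var) dep) && !(acc.contains dep) then acc ++ [dep] else acc) nxt with hnxt'
        have hdep : deps.foldl (fun nf dep => if PySem.Set.contains (PySem.Set.add seen var) dep then nf else PySem.Set.add nf dep) nxt = nxt' := by
          rw [hnxt', depfold_fun_eq]
        have hB : pyLevelB last (var :: rest) seen nxt
            = ((var, expr) :: (pyLevelB last rest (PySem.Set.add seen var) nxt').1,
               (pyLevelB last rest (PySem.Set.add seen var) nxt').2.1,
               (pyLevelB last rest (PySem.Set.add seen var) nxt').2.2) := by
          rw [pyLevelB, hcb, hg]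
          simp only [Bool.false_eq_true, if_false]
          rfl
        rw [hA, hdep, hB, ih (chain ++ [(avar, expr)]) (PySem.Set.add seen var) nxt', hfst]
        simp [List.append_assoc]

-- the depth loop of A IS pyLoopB
lemma loop_eq (bl : Int) (asg : List (Int × String × String × List String))
    (last : PySem.Dict String (String × List String))
    (hget : ∀ v, PySem.Dict.get? last v = (pyLastAssign v bl asg).map (fun t => t.2)) :
    ∀ (n : Nat) (frontier : List String) (chain : List (String × String)) (seen : PySem.Set String),
      (pyDepthLoopA bl asg n (chain, frontier, seen)).1 = pyLoopB last n frontier chain seen := by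
  intro n
  induction n with
  | zero => intro frontier chain seen; rfl
  | succ n ih =>
    intro frontier chain seen
    cases frontier with
    | nil =>
      have hA : pyDepthLoopA bl asg (n + 1) (chain, ([] : List String), seen) = (chain, [], seen) := by
        rw [pyDepthLoopA]; simp
      rw [hA]
      cases n <;> simp [pyLoopB]
    | cons v rest =>
      have hne : (v :: rest : List String) ≠ [] := by simp
      have hA : pyDepthLoopA bl asg (n + 1) (chain, v :: rest, seen)
          = pyDepthLoopA bl asg n
              (chain ++ (pyLevelB last (v :: rest) seen []).1,
               (pyLevelB last (v :: rest) seen []).2.2,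
               (pyLevelB last (v :: rest) seen []).2.1) := by
        rw [pyDepthLoopA]
        simp only [if_neg hne]
        rw [show ((v :: rest).foldl
              (fun (st2 : List (String × String) × PySem.Set String × PySem.Set String) var =>
                if PySem.Set.contains st2.2.1 var || var == "__STUB__" then st2
                else
                  let seen2 := PySem.Set.add st2.2.1 var
                  match pyLastAssign var bl asg with
                  | none => (st2.1, seen2, st2.2.2)
                  | some (avar, expr, deps) =>
                    (st2.1 ++ [(avar, expr)], seen2,
                     deps.foldl (fun nf dep => if PySem.Set.contains seen2 dep then nf else PySem.Set.add nf dep) st2.2.2))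
              (chain, seen, (PySem.Set.empty : PySem.Set String)))
            = (v :: rest).foldl (pvInnerA bl asg) (chain, seen, (PySem.Set.empty : PySem.Set String)) from rfl]
        rw [level_eq bl asg last hget (v :: rest) chain seen PySem.Set.empty]
        rfl
      rw [hA, ih]
      rfl

-- ===== VERDICT (by name: the statement is the Claim_ definition above) =====
theorem trace_backward_py_spec : Claim_equal_trace_backward_py := by
  intro tv bl asg md _
  unfold Spec_trace_backward_py trace_backward_py
  have hget : ∀ v, PySem.Dict.get? (pvDictB bl asg) v = (pyLastAssign v bl asg).map (fun t => t.2) :=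
    fun v => dict_eq_scan v bl asg
  rw [show (PySem.Set.ofList [tv] : PySem.Set String) = ([tv] : List String) from rfl]
  rw [loop_eq bl asg (pvDictB bl asg) hget md.toNat [tv] [] PySem.Set.empty]
  rfl
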